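-- pv_equiv track=rewrite | github.com/Teake1404/ga4_analytics_mcp | cross_platform_analyzer.py | _calculate_ranking_distribution
-- ===== SOURCE A (Python) =====
-- from typing import Dict, List, Any, Optional
--
-- def _calculate_ranking_distribution(keywords: List[Dict[str, Any]]) -> Dict[str, int]:
--     """Calculate distribution of keyword rankings"""
--     distribution = {
--         "positions_1_3": 0,
--         "positions_4_10": 0,
--         "positions_11_20": 0,
--         "positions_21_50": 0,
--         "positions_51_plus": 0
--     }
--
--     for kw in keywords:
--         position = kw.get("position", 999)
--         if position <= 3:
--             distribution["positions_1_3"] += 1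
--         elif position <= 10:
--             distribution["positions_4_10"] += 1
--         elif position <= 20:
--             distribution["positions_11_20"] += 1
--         elif position <= 50:
--             distribution["positions_21_50"] += 1
--         else:
--             distribution["positions_51_plus"] += 1
--
--     return distribution
-- ===== SOURCE B (Python) =====
-- from typing import Dict, List, Any
--
-- def _calculate_ranking_distribution(keywords: List[Dict[str, Any]]) -> Dict[str, int]:
--     """Calculate distribution of keyword rankings via cumulative counts:
--     for each threshold t count how many positions are <= t, then the five
--     buckets are successive differences of those cumulative counts."""
--     positions = [kw.get("position", 999) for kw in keywords]
--     c3 = sum(1 for p in positions if p <= 3)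
--     c10 = sum(1 for p in positions if p <= 10)
--     c20 = sum(1 for p in positions if p <= 20)
--     c50 = sum(1 for p in positions if p <= 50)
--     return {
--         "positions_1_3": c3,
--         "positions_4_10": c10 - c3,
--         "positions_11_20": c20 - c10,
--         "positions_21_50": c50 - c20,
--         "positions_51_plus": len(positions) - c50,
--     }
-- ===== Notes on version B (the rewrite author's own statement) =====
-- stated objective: alternative
-- what changed: Instead of dispatching each keyword into one of five buckets with an if/elif chain, B makes staged passes computing cumulative counts of positions <= each threshold and derives the buckets as successive differences of those cumulative counts.
import Mathlib
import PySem

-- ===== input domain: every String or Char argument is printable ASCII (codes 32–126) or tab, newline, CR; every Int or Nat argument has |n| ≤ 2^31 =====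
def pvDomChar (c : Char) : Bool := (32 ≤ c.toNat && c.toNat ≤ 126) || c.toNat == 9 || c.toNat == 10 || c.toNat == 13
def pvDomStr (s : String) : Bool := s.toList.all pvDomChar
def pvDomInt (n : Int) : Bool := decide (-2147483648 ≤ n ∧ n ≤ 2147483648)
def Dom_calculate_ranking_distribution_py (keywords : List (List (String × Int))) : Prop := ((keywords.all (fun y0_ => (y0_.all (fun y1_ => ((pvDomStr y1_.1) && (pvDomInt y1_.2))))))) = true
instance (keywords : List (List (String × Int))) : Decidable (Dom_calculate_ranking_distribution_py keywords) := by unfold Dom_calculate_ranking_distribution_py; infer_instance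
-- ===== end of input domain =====

-- B replaces the per-keyword if/elif bucket dispatch by staged passes computing
-- cumulative counts (positions <= each threshold) and takes successive differences
-- (objective: alternative; same O(n) cost).

-- ===== PORT A =====
def calculate_ranking_distribution_py (keywords : List (List (String × Int))) : List (String × Int) :=
  let distribution : PySem.Dict String Int := PySem.Dict.mk
    [("positions_1_3", 0), ("positions_4_10", 0), ("positions_11_20", 0),
     ("positions_21_50", 0), ("positions_51_plus", 0)]
  let distribution := keywords.foldl (fun dist kw =>
    let position := (PySem.Dict.mk kw).getD "position" 999
    if position ≤ 3 then dist.modify "positions_1_3" 0 (· + 1)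
    else if position ≤ 10 then dist.modify "positions_4_10" 0 (· + 1)
    else if position ≤ 20 then dist.modify "positions_11_20" 0 (· + 1)
    else if position ≤ 50 then dist.modify "positions_21_50" 0 (· + 1)
    else dist.modify "positions_51_plus" 0 (· + 1)) distribution
  distribution.items

-- ===== PORT B =====
-- sum(1 for p in positions if p <= t)  ≡  number of elements of positions that are ≤ t
def pvCountLe (positions : List Int) (t : Int) : Int :=
  (positions.countP (fun p => decide (p ≤ t)) : Int)

def calculate_ranking_distribution_py_alt (keywords : List (List (String × Int))) : List (String × Int) :=
  let positions := keywords.map (fun kw => (PySem.Dict.mk kw).getD "position" 999)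
  let c3 := pvCountLe positions 3
  let c10 := pvCountLe positions 10
  let c20 := pvCountLe positions 20
  let c50 := pvCountLe positions 50
  [("positions_1_3", c3),
   ("positions_4_10", c10 - c3),
   ("positions_11_20", c20 - c10),
   ("positions_21_50", c50 - c20),
   ("positions_51_plus", (positions.length : Int) - c50)]

-- ===== PRECONDITION & SPEC =====
def Spec_calculate_ranking_distribution_py (keywords : List (List (String × Int))) (out : List (String × Int)) : Prop := out = calculate_ranking_distribution_py_alt keywords
instance (keywords : List (List (String × Int))) (out : List (String × Int)) : Decidable (Spec_calculate_ranking_distribution_py keywords out) := by unfold Spec_calculate_ranking_distribution_py; infer_instance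

-- ===== CLAIM (what is proved, stated in full; the proofs are below) =====
def Claim_equal_calculate_ranking_distribution_py : Prop := ∀ (keywords : List (List (String × Int))), Dom_calculate_ranking_distribution_py keywords → Spec_calculate_ranking_distribution_py keywords (calculate_ranking_distribution_py keywords)

-- ===== LEMMAS AND PROOFS =====

def pvKeys : List String :=
  ["positions_1_3", "positions_4_10", "positions_11_20", "positions_21_50", "positions_51_plus"]

def pvMk (cs : List Int) : PySem.Dict String Int := PySem.Dict.mk (pvKeys.zip cs)

-- A's loop, characterised: it adds to the accumulator the counts of the five disjoint bands
theorem pv_loopA (keywords : List (List (String × Int))) (a b c d e : Int) :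
    (keywords.foldl (fun dist kw =>
      let position := (PySem.Dict.mk kw).getD "position" 999
      if position ≤ 3 then dist.modify "positions_1_3" 0 (· + 1)
      else if position ≤ 10 then dist.modify "positions_4_10" 0 (· + 1)
      else if position ≤ 20 then dist.modify "positions_11_20" 0 (· + 1)
      else if position ≤ 50 then dist.modify "positions_21_50" 0 (· + 1)
      else dist.modify "positions_51_plus" 0 (· + 1)) (pvMk [a, b, c, d, e])).items
    = (let ps := keywords.map (fun kw => (PySem.Dict.mk kw).getD "position" 999)
       [("positions_1_3", a + (ps.countP (fun p => decide (p ≤ 3)) : Int)),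
        ("positions_4_10", b + (ps.countP (fun p => decide (3 < p) && decide (p ≤ 10)) : Int)),
        ("positions_11_20", c + (ps.countP (fun p => decide (10 < p) && decide (p ≤ 20)) : Int)),
        ("positions_21_50", d + (ps.countP (fun p => decide (20 < p) && decide (p ≤ 50)) : Int)),
        ("positions_51_plus", e + (ps.countP (fun p => decide (50 < p)) : Int))]) := by
  induction keywords generalizing a b c d e with
  | nil => simp [pvMk, pvKeys]
  | cons kw rest ih =>
    simp only [List.foldl_cons, List.map_cons, List.countP_cons]
    set p := (PySem.Dict.mk kw).getD "position" 999 with hp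
    by_cases h1 : p ≤ 3
    · have hd : (pvMk [a, b, c, d, e]).modify "positions_1_3" 0 (· + 1) = pvMk [a + 1, b, c, d, e] := by
        simp [pvMk, pvKeys, PySem.Dict.modify, PySem.Dict.insert, PySem.Dict.contains, PySem.Dict.getD, PySem.Dict.get?]
      have n3 : ¬ (3 < p) := by omega
      have n10 : ¬ (10 < p) := by omega
      have n20 : ¬ (20 < p) := by omega
      have n50 : ¬ (50 < p) := by omega
      simp only [h1, if_pos, hd, ih]
      simp [n3, n10, n20, n50]
      omega
    · by_cases h2 : p ≤ 10
      · have hd : (pvMk [a, b, c, d, e]).modify "positions_4_10" 0 (· + 1) = pvMk [a, b + 1, c, d, e] := by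
          simp [pvMk, pvKeys, PySem.Dict.modify, PySem.Dict.insert, PySem.Dict.contains, PySem.Dict.getD, PySem.Dict.get?]
        have g3 : 3 < p := by omega
        have n10 : ¬ (10 < p) := by omega
        have n20 : ¬ (20 < p) := by omega
        have n50 : ¬ (50 < p) := by omega
        simp only [h1, h2, if_neg, if_pos, not_false_iff, hd, ih]
        simp [g3, n10, n20, n50]
        omega
      · by_cases h3 : p ≤ 20
        · have hd : (pvMk [a, b, c, d, e]).modify "positions_11_20" 0 (· + 1) = pvMk [a, b, c + 1, d, e] := by
            simp [pvMk, pvKeys, PySem.Dict.modify, PySem.Dict.insert, PySem.Dict.contains, PySem.Dict.getD, PySem.Dict.get?]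
          have g10 : 10 < p := by omega
          have n20 : ¬ (20 < p) := by omega
          have n50 : ¬ (50 < p) := by omega
          simp only [h1, h2, h3, if_neg, if_pos, not_false_iff, hd, ih]
          simp [g10, n20, n50]
          omega
        · by_cases h4 : p ≤ 50
          · have hd : (pvMk [a, b, c, d, e]).modify "positions_21_50" 0 (· + 1) = pvMk [a, b, c, d + 1, e] := by
              simp [pvMk, pvKeys, PySem.Dict.modify, PySem.Dict.insert, PySem.Dict.contains, PySem.Dict.getD, PySem.Dict.get?]
            have g20 : 20 < p := by omega
            have n50 : ¬ (50 < p) := by omega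
            simp only [h1, h2, h3, h4, if_neg, if_pos, not_false_iff, hd, ih]
            simp [g20, n50]
            omega
          · have hd : (pvMk [a, b, c, d, e]).modify "positions_51_plus" 0 (· + 1) = pvMk [a, b, c, d, e + 1] := by
              simp [pvMk, pvKeys, PySem.Dict.modify, PySem.Dict.insert, PySem.Dict.contains, PySem.Dict.getD, PySem.Dict.get?]
            have g50 : 50 < p := by omega
            simp only [h1, h2, h3, h4, if_neg, not_false_iff, hd, ih]
            simp [g50]
            omega

-- cumulative counts split at a lower threshold
theorem pv_split (ps : List Int) (s t : Int) (hst : s ≤ t) :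
    ps.countP (fun p => decide (p ≤ t)) =
      ps.countP (fun p => decide (p ≤ s)) + ps.countP (fun p => decide (s < p) && decide (p ≤ t)) := by
  induction ps with
  | nil => rfl
  | cons p rest ih =>
    simp only [List.countP_cons, ih]
    by_cases h1 : p ≤ s
    · have h2 : p ≤ t := le_trans h1 hst
      have h3 : ¬ (s < p) := by omega
      simp [h1, h2, h3]
      omega
    · have h3 : s < p := by omega
      by_cases h2 : p ≤ t <;> simp [h1, h2, h3] <;> omega

-- the tail bucket: everything above the last threshold
theorem pv_total (ps : List Int) (t : Int) :
    ps.length = ps.countP (fun p => decide (p ≤ t)) + ps.countP (fun p => decide (t < p)) := by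
  induction ps with
  | nil => rfl
  | cons p rest ih =>
    simp only [List.countP_cons, List.length_cons, ih]
    by_cases h : p ≤ t
    · have : ¬ (t < p) := by omega
      simp [h, this]; omega
    · have : t < p := by omega
      simp [h, this]; omega

-- ===== VERDICT (by name: the statement is the Claim_ definition above) =====
theorem calculate_ranking_distribution_py_spec : Claim_equal_calculate_ranking_distribution_py := by
  intro keywords _
  show calculate_ranking_distribution_py keywords = calculate_ranking_distribution_py_alt keywords
  have h0 : (PySem.Dict.mk
      [("positions_1_3", (0:Int)), ("positions_4_10", 0), ("positions_11_20", 0),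
       ("positions_21_50", 0), ("positions_51_plus", 0)]) = pvMk [0, 0, 0, 0, 0] := rfl
  unfold calculate_ranking_distribution_py calculate_ranking_distribution_py_alt
  rw [h0, pv_loopA keywords 0 0 0 0 0]
  set ps := keywords.map (fun kw => (PySem.Dict.mk kw).getD "position" 999) with hps
  have e10 := pv_split ps 3 10 (by norm_num)
  have e20 := pv_split ps 10 20 (by norm_num)
  have e50 := pv_split ps 20 50 (by norm_num)
  have etot := pv_total ps 50
  simp only [pvCountLe, List.cons.injEq, Prod.mk.injEq, and_true]
  refine ⟨⟨trivial, by omega⟩, ⟨trivial, by omega⟩, ⟨trivial, by omega⟩, ⟨trivial, by omega⟩, trivial, by omega⟩
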